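-- pv_equiv track=rewrite | github.com/Ceradtoderma/subscribes_4pda | func.py | make_pac
-- ===== SOURCE A (Python) =====
-- def select(prev_item, data):
--     selected_data = []
--     for i in data:
--         if i[3] == prev_item:
--             break
--         else:
--             selected_data.append(i)
--     selected_data.reverse()
--     return selected_data
--
-- def make_pac(urls, users, prev_items, row_data):
--     pac = {}
--     for user in users:
--         pac[user[0]] = []
--
--     for user in pac:
--         for url in urls:
--             prev_item = prev_items[user][url]
--             if prev_item:
--                 data = row_data[url]
--                 selected_data = select(prev_item, data)
--                 if selected_data:
--                     for i in selected_data: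
--                         pac[user].append(i)
--     return pac
-- ===== SOURCE B (Python) =====
-- def make_pac(urls, users, prev_items, row_data):
--     # One pass per url of row_data builds a table: marker value (first occurrence)
--     # -> reversed list of the items before it; second component = reversed full
--     # list, used when the marker does not occur.
--     tables = {}
--     for url, data in row_data.items():
--         tab, seen = {}, []
--         for i in data:
--             if i[3] not in tab:
--                 tab[i[3]] = seen[::-1]
--             seen.append(i)
--         tables[url] = (tab, seen[::-1])
--
--     def chunk(user, url):
--         pi = prev_items[user][url]
--         if not pi:
--             return []
--         tab, whole = tables.get(url, ({}, []))
--         return tab.get(pi, whole)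
--
--     return {u: [i for url in urls for i in chunk(u, url)]
--             for u in dict.fromkeys(u for u, _ in users)}
-- ===== Notes on version B (the rewrite author's own statement) =====
-- stated objective: alternative
-- what changed: B precomputes, in one pass per url of row_data, a table mapping each marker value (first occurrence) to the reversed list of items before it (plus a reversed-full-list default for absent markers), and builds the result dict directly as a comprehension over deduplicated user keys with flat per-user concatenation, instead of A's per-(user,url) scan-with-break and in-place dict mutation.
import Mathlib
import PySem

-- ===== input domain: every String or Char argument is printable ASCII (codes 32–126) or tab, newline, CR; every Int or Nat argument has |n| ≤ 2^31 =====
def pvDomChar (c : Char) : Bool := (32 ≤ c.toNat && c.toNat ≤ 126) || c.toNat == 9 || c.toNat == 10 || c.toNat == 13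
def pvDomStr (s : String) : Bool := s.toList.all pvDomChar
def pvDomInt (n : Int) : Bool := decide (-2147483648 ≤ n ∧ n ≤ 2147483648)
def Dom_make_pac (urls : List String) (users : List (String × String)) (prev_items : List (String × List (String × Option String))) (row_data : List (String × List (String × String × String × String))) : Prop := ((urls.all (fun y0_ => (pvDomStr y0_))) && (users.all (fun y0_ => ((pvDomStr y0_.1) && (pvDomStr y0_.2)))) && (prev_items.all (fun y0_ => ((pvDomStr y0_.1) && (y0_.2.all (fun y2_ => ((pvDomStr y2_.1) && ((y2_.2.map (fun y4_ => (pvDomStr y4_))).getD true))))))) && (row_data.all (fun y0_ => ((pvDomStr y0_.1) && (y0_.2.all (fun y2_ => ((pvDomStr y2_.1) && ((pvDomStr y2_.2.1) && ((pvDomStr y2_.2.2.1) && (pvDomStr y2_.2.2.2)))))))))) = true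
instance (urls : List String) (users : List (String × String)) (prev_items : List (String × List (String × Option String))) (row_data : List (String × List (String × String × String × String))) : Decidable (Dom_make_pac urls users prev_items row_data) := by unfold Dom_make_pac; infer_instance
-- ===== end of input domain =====

-- B precomputes one marker→reversed-prefix table per url of row_data and builds the result dict
-- directly as a comprehension over the deduplicated user keys (flat concatenation per user),
-- instead of A's per-(user,url) scan-with-break and in-place dict mutation; objective: alternative.

-- ===== PORT A =====
-- select(prev_item, data): scan with break at the first i with i[3] == prev_item, then reverse
def pvSelGo (prev_item : String) : List (String × String × String × String) → List (String × String × String × String) → List (String × String × String × String)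
  | [], selected => selected
  | i :: rest, selected =>
      if i.2.2.2 == prev_item then selected else pvSelGo prev_item rest (selected ++ [i])

def pvSelect (prev_item : String) (data : List (String × String × String × String)) : List (String × String × String × String) :=
  (pvSelGo prev_item data []).reverse

-- body of A's inner 'for url in urls' loop
def pvStepA (pd : PySem.Dict String (List (String × Option String))) (rd : PySem.Dict String (List (String × String × String × String))) (user : String) (pac : PySem.Dict String (List (String × String × String × String))) (url : String) : PySem.Dict String (List (String × String × String × String)) :=
  match (PySem.Dict.mk (pd.getD user [])).getD url none with
  | none => pac
  | some s =>
      if s == "" then pac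
      else
        let selected_data := pvSelect s (rd.getD url [])
        if selected_data.isEmpty then pac
        else pac.modify user [] (fun l => l ++ selected_data)

def make_pac (urls : List String) (users : List (String × String)) (prev_items : List (String × List (String × Option String))) (row_data : List (String × List (String × String × String × String))) : List (String × List (String × String × String × String)) :=
  let pd := PySem.Dict.mk prev_items
  let rd := PySem.Dict.mk row_data
  let pac0 : PySem.Dict String (List (String × String × String × String)) :=
    users.foldl (fun d user => d.insert user.1 []) PySem.Dict.empty
  (pac0.keys.foldl (fun pac user => urls.foldl (pvStepA pd rd user) pac) pac0).items

-- ===== PORT B =====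
-- one forward scan over data: tab maps each marker (first occurrence) to the reversed prefix, seen collects all items
def pvBuildGo : List (String × String × String × String) → PySem.Dict String (List (String × String × String × String)) → List (String × String × String × String) → PySem.Dict String (List (String × String × String × String)) × List (String × String × String × String)
  | [], tab, seen => (tab, seen)
  | i :: rest, tab, seen =>
      pvBuildGo rest (if tab.contains i.2.2.2 then tab else tab.insert i.2.2.2 seen.reverse) (seen ++ [i])

-- 'for url, data in row_data.items(): … tables[url] = (tab, seen[::-1])'
def pvTables (row_data : List (String × List (String × String × String × String))) : PySem.Dict String (PySem.Dict String (List (String × String × String × String)) × List (String × String × String × String)) :=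
  row_data.foldl (fun t p =>
      let b := pvBuildGo p.2 PySem.Dict.empty []
      t.insert p.1 (b.1, b.2.reverse))
    PySem.Dict.empty

-- chunk(user, url): prev-item lookup, truthiness test, then a pure table lookup
def pvChunk (pd : PySem.Dict String (List (String × Option String))) (tables : PySem.Dict String (PySem.Dict String (List (String × String × String × String)) × List (String × String × String × String))) (user url : String) : List (String × String × String × String) :=
  match (PySem.Dict.mk (pd.getD user [])).getD url none with
  | none => []
  | some s =>
      if s == "" then []
      else
        let td := tables.getD url (PySem.Dict.empty, [])
        td.1.getD s td.2

def make_pac_alt (urls : List String) (users : List (String × String)) (prev_items : List (String × List (String × Option String))) (row_data : List (String × List (String × String × String × String))) : List (String × List (String × String × String × String)) :=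
  let tables := pvTables row_data
  let pd := PySem.Dict.mk prev_items
  (PySem.List.dedup (users.map Prod.fst)).map (fun u => (u, urls.flatMap (pvChunk pd tables u)))

-- ===== PRECONDITION & SPEC =====
-- Pre_ excludes exactly (a) the inputs where the Python A raises KeyError — a user key missing
-- from prev_items, a url missing from a user's inner dict, or a url with a truthy prev_item
-- missing from row_data — and (b) row_data association lists with duplicate keys, which do not
-- represent any Python dict (the row_data parameter is a dict, whose keys are unique by construction).
def pvPreInner (urls : List String) (row_data : List (String × List (String × String × String × String))) (inner : List (String × Option String)) : Prop :=
  ∀ url ∈ urls, (PySem.Dict.mk inner).contains url = true ∧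
    ((PySem.Dict.mk inner).getD url none = none ∨ (PySem.Dict.mk inner).getD url none = some "" ∨ (PySem.Dict.mk row_data).contains url = true)

def Pre_make_pac (urls : List String) (users : List (String × String)) (prev_items : List (String × List (String × Option String))) (row_data : List (String × List (String × String × String × String))) : Prop :=
  (row_data.map Prod.fst).Nodup ∧
  ∀ user ∈ users, (urls = [] ∨ (PySem.Dict.mk prev_items).contains user.1 = true) ∧
    pvPreInner urls row_data ((PySem.Dict.mk prev_items).getD user.1 [])

instance (urls : List String) (users : List (String × String)) (prev_items : List (String × List (String × Option String))) (row_data : List (String × List (String × String × String × String))) : Decidable (Pre_make_pac urls users prev_items row_data) := by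
  unfold Pre_make_pac pvPreInner; infer_instance

def pvWitness_make_pac : List String × (List (String × String)) × (List (String × List (String × Option String))) × (List (String × List (String × String × String × String))) :=
  (["u"], [("a", "x")], [("a", [("u", some "m")])], [("u", [("1", "2", "3", "m"), ("4", "5", "6", "z")])])

def Spec_make_pac (urls : List String) (users : List (String × String)) (prev_items : List (String × List (String × Option String))) (row_data : List (String × List (String × String × String × String))) (out : List (String × List (String × String × String × String))) : Prop := out = make_pac_alt urls users prev_items row_data
instance (urls : List String) (users : List (String × String)) (prev_items : List (String × List (String × Option String))) (row_data : List (String × List (String × String × String × String))) (out : List (String × List (String × String × String × String))) : Decidable (Spec_make_pac urls users prev_items row_data out) := by unfold Spec_make_pac; infer_instance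

-- ===== CLAIM (what is proved, stated in full; the proofs are below) =====
def Claim_equal_make_pac : Prop := ∀ (urls : List String) (users : List (String × String)) (prev_items : List (String × List (String × Option String))) (row_data : List (String × List (String × String × String × String))), Dom_make_pac urls users prev_items row_data → Pre_make_pac urls users prev_items row_data → Spec_make_pac urls users prev_items row_data (make_pac urls users prev_items row_data)

-- ===== LEMMAS AND PROOFS =====

theorem pv_witness_ok : Dom_make_pac (pvWitness_make_pac.1) (pvWitness_make_pac.2.1) (pvWitness_make_pac.2.2.1) (pvWitness_make_pac.2.2.2) ∧ Pre_make_pac (pvWitness_make_pac.1) (pvWitness_make_pac.2.1) (pvWitness_make_pac.2.2.1) (pvWitness_make_pac.2.2.2) := by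
  constructor <;> decide

-- A's per-url contribution for a user, as a value (what select/the truthiness tests yield)
def pvSegA (pd : PySem.Dict String (List (String × Option String))) (rd : PySem.Dict String (List (String × String × String × String))) (user url : String) : List (String × String × String × String) :=
  match (PySem.Dict.mk (pd.getD user [])).getD url none with
  | none => []
  | some s => if s == "" then [] else pvSelect s (rd.getD url [])

theorem buildGo_get?_of_some (data : List (String × String × String × String)) (tab : PySem.Dict String (List (String × String × String × String))) (seen : List (String × String × String × String)) (s : String) (v : List (String × String × String × String)) (h : tab.get? s = some v) :
    (pvBuildGo data tab seen).1.get? s = some v := by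
  induction data generalizing tab seen with
  | nil => simpa [pvBuildGo] using h
  | cons i rest ih =>
      simp only [pvBuildGo]
      split
      · exact ih _ _ h
      · rename_i hnc
        have hne : s ≠ i.2.2.2 := by
          intro he
          apply hnc
          rw [he] at h
          rw [PySem.Dict.contains_eq_isSome_get?, h]
          rfl
        apply ih
        rw [PySem.Dict.get?_insert_of_ne _ _ hne]
        exact h

theorem buildGo_getD_select (data : List (String × String × String × String)) (tab : PySem.Dict String (List (String × String × String × String))) (seen : List (String × String × String × String)) (s : String) (h : tab.contains s = false) :
    (pvBuildGo data tab seen).1.getD s ((pvBuildGo data tab seen).2.reverse) = (pvSelGo s data seen).reverse := by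
  induction data generalizing tab seen with
  | nil =>
      simp only [pvBuildGo, pvSelGo]
      exact PySem.Dict.getD_of_not_contains tab seen.reverse h
  | cons i rest ih =>
      simp only [pvBuildGo, pvSelGo]
      by_cases hct : tab.contains i.2.2.2 = true
      · have he : i.2.2.2 ≠ s := fun he => by rw [he, h] at hct; exact absurd hct (by simp)
        rw [if_pos hct, if_neg (by simp [he])]
        exact ih tab _ h
      · rw [if_neg hct]
        by_cases he : i.2.2.2 = s
        · rw [if_pos (by simp [he])]
          have hg : ((pvBuildGo rest (tab.insert i.2.2.2 seen.reverse) (seen ++ [i])).1).get? s = some seen.reverse := by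
            apply buildGo_get?_of_some
            rw [he]
            exact PySem.Dict.get?_insert_self tab s seen.reverse
          rw [PySem.Dict.getD_eq_get?_getD, hg]
          rfl
        · rw [if_neg (by simp [he])]
          apply ih
          rw [PySem.Dict.contains_insert]
          simp [h, (Ne.symm he : s ≠ i.2.2.2)]

theorem seg_eq (data : List (String × String × String × String)) (s : String) :
    (pvBuildGo data PySem.Dict.empty []).1.getD s ((pvBuildGo data PySem.Dict.empty []).2.reverse) = pvSelect s data := by
  rw [pvSelect]
  exact buildGo_getD_select data _ [] s (by simp [PySem.Dict.contains_empty])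

-- the table B stores for url describes exactly the list row_data associates (first match) with url
theorem tables_getD (row_data : List (String × List (String × String × String × String))) (hnd : (row_data.map Prod.fst).Nodup) (url : String) :
    (pvTables row_data).getD url (PySem.Dict.empty, []) =
      ((pvBuildGo ((PySem.Dict.mk row_data).getD url []) PySem.Dict.empty []).1,
       (pvBuildGo ((PySem.Dict.mk row_data).getD url []) PySem.Dict.empty []).2.reverse) := by
  have hitems : (pvTables row_data).items =
      row_data.map (fun p => (p.1, ((pvBuildGo p.2 PySem.Dict.empty []).1, (pvBuildGo p.2 PySem.Dict.empty []).2.reverse))) := by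
    have h := PySem.Dict.items_foldl_insert_fresh row_data Prod.fst
      (fun p => ((pvBuildGo p.2 PySem.Dict.empty []).1, (pvBuildGo p.2 PySem.Dict.empty []).2.reverse))
      PySem.Dict.empty (fun a _ => PySem.Dict.contains_empty a.1) hnd
    simpa [pvTables] using h
  have hkeys : (pvTables row_data).keys = row_data.map Prod.fst := by
    simp only [PySem.Dict.keys, hitems, List.map_map]
    rfl
  rcases h : (PySem.Dict.mk row_data).get? url with _ | data
  · have hnm : url ∉ (pvTables row_data).keys := by
      rw [hkeys]
      exact (PySem.Dict.get?_eq_none_iff_not_mem_keys (PySem.Dict.mk row_data) url).mp h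
    have hnc : (pvTables row_data).contains url = false := by
      rw [← Bool.not_eq_true, PySem.Dict.contains_iff_mem_keys]
      exact hnm
    rw [PySem.Dict.getD_of_not_contains _ _ hnc, PySem.Dict.getD_eq_get?_getD, h]
    rfl
  · have hmem : (url, data) ∈ row_data := PySem.Dict.mem_items_of_get?_eq_some (PySem.Dict.mk row_data) h
    have hmem' : (url, ((pvBuildGo data PySem.Dict.empty []).1, (pvBuildGo data PySem.Dict.empty []).2.reverse)) ∈ (pvTables row_data).items := by
      rw [hitems]
      exact List.mem_map.mpr ⟨(url, data), hmem, rfl⟩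
    rw [PySem.Dict.getD_of_mem_items _ hmem' (by rw [hkeys]; exact hnd), PySem.Dict.getD_eq_get?_getD, h]
    rfl

-- B's chunk computes A's per-url contribution
theorem chunk_eq (prev_items : List (String × List (String × Option String))) (row_data : List (String × List (String × String × String × String))) (hnd : (row_data.map Prod.fst).Nodup) (user url : String) :
    pvChunk (PySem.Dict.mk prev_items) (pvTables row_data) user url = pvSegA (PySem.Dict.mk prev_items) (PySem.Dict.mk row_data) user url := by
  unfold pvChunk pvSegA
  rcases (PySem.Dict.mk ((PySem.Dict.mk prev_items).getD user [])).getD url none with _ | s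
  · rfl
  · by_cases hse : (s == "") = true
    · simp only [if_pos hse]
    · simp only [if_neg hse]
      rw [tables_getD row_data hnd url]
      exact seg_eq _ s

-- a modify that appends nothing to an existing key is the identity (keys unique)
theorem find_map_id {V : Type} (l : List (String × V)) (k : String) (v : V) (hnd : (l.map Prod.fst).Nodup) (h : l.find? (fun p => p.1 == k) = some (k, v)) :
    l.map (fun p => if p.1 == k then (k, v) else p) = l := by
  induction l with
  | nil => simp at h
  | cons p t ih =>
      rw [List.find?_cons] at h
      by_cases hp : (p.1 == k) = true
      · rw [hp] at h
        simp at h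
        have hk' : k ∉ t.map Prod.fst := by
          have hk : p.1 = k := by simpa using hp
          have := List.nodup_cons.mp hnd
          exact hk ▸ this.1
        have htail : List.map (fun p => if p.1 == k then (k, v) else p) t = t := by
          rw [List.map_congr_left (g := id) ?_, List.map_id]
          intro q hq
          have hq' : q.1 ≠ k := fun he => hk' (he ▸ List.mem_map.mpr ⟨q, hq, rfl⟩)
          simp [hq']
        rw [List.map_cons, if_pos hp, htail, ← h]
      · rw [Bool.not_eq_true] at hp
        rw [hp] at h
        rw [List.map_cons, if_neg (by simp [hp]), ih (List.nodup_cons.mp hnd).2 h]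

theorem modify_nil_noop (d : PySem.Dict String (List (String × String × String × String))) (k : String) (hc : d.contains k = true) (hnd : d.keys.Nodup) :
    d.modify k [] (fun l => l ++ []) = d := by
  have hs : (d.get? k).isSome := by rw [← PySem.Dict.contains_eq_isSome_get?]; exact hc
  rcases Option.isSome_iff_exists.mp hs with ⟨v, hv⟩
  have hfind : d.items.find? (fun p => p.1 == k) = some (k, v) := by
    unfold PySem.Dict.get? at hv
    rcases hfe : d.items.find? (fun p => p.1 == k) with _ | p
    · rw [hfe] at hv; simp at hv
    · rw [hfe] at hv
      simp at hv
      have hk : p.1 = k := by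
        have := List.find?_some hfe
        simpa using this
      rw [hfe]
      cases p
      simp_all
  show d.insert k ((d.getD k []) ++ []) = d
  rw [PySem.Dict.getD_eq_get?_getD, hv]
  show d.insert k (v ++ []) = d
  rw [List.append_nil]
  unfold PySem.Dict.insert
  rw [if_pos hc]
  apply PySem.Dict.ext
  exact find_map_id d.items k v hnd hfind

theorem modify_noop_of_eq_nil (d : PySem.Dict String (List (String × String × String × String))) (k : String) (a : List (String × String × String × String)) (ha : a = []) (hc : d.contains k = true) (hnd : d.keys.Nodup) :
    d.modify k [] (fun l => l ++ a) = d := by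
  subst ha; exact modify_nil_noop d k hc hnd

-- two append-modifies at the same key fuse
theorem modify_modify (d : PySem.Dict String (List (String × String × String × String))) (k : String) (a b : List (String × String × String × String)) :
    (d.modify k [] (fun l => l ++ a)).modify k [] (fun l => l ++ b) = d.modify k [] (fun l => l ++ (a ++ b)) := by
  show (d.insert k (d.getD k [] ++ a)).insert k ((d.insert k (d.getD k [] ++ a)).getD k [] ++ b) = d.insert k (d.getD k [] ++ (a ++ b))
  rw [PySem.Dict.getD_insert_self, PySem.Dict.insert_insert_self, List.append_assoc]

-- A's inner-loop body is an append-modify at the user's key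
theorem stepA_modify (pd : PySem.Dict String (List (String × Option String))) (rd : PySem.Dict String (List (String × String × String × String))) (user url : String) (pac : PySem.Dict String (List (String × String × String × String))) (hc : pac.contains user = true) (hnd : pac.keys.Nodup) :
    pvStepA pd rd user pac url = pac.modify user [] (fun l => l ++ pvSegA pd rd user url) := by
  unfold pvStepA pvSegA
  rcases (PySem.Dict.mk (pd.getD user [])).getD url none with _ | s
  · exact (modify_nil_noop pac user hc hnd).symm
  · by_cases hse : (s == "") = true
    · simp only [if_pos hse]
      exact (modify_nil_noop pac user hc hnd).symm
    · simp only [if_neg hse]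
      by_cases hsel : (pvSelect s (rd.getD url [])).isEmpty = true
      · rw [if_pos hsel]
        exact (modify_noop_of_eq_nil pac user _ (List.isEmpty_iff.mp hsel) hc hnd).symm
      · rw [if_neg hsel]

-- modify preserves keys at a present key
theorem keys_modify_of_contains (d : PySem.Dict String (List (String × String × String × String))) (k : String) (f : List (String × String × String × String) → List (String × String × String × String)) (hc : d.contains k = true) :
    (d.modify k [] f).keys = d.keys := by
  rw [PySem.Dict.keys_modify]
  exact PySem.Dict.keys_insert_of_contains d _ hc

-- A's inner loop over urls collapses to one append of the flat concatenation
theorem inner_fold (pd : PySem.Dict String (List (String × Option String))) (rd : PySem.Dict String (List (String × String × String × String))) (user : String) (us : List String) (pac : PySem.Dict String (List (String × String × String × String))) (hc : pac.contains user = true) (hnd : pac.keys.Nodup) :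
    us.foldl (pvStepA pd rd user) pac = pac.modify user [] (fun l => l ++ us.flatMap (pvSegA pd rd user)) := by
  induction us generalizing pac with
  | nil =>
      simp only [List.foldl_nil, List.flatMap_nil]
      exact (modify_nil_noop pac user hc hnd).symm
  | cons url rest ih =>
      simp only [List.foldl_cons, List.flatMap_cons]
      rw [stepA_modify pd rd user url pac hc hnd]
      have hk := keys_modify_of_contains pac user (fun l => l ++ pvSegA pd rd user url) hc
      rw [ih _ (by rw [PySem.Dict.contains_iff_mem_keys, hk, ← PySem.Dict.contains_iff_mem_keys]; exact hc) (hk ▸ hnd)]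
      exact modify_modify pac user _ _

-- a fold of modifies at keys ≠ u leaves u's value alone
theorem fold_modify_getD_notmem (F : String → List (String × String × String × String)) (ks : List String) (d : PySem.Dict String (List (String × String × String × String))) (u : String) (hu : u ∉ ks) :
    (ks.foldl (fun pac k => pac.modify k [] (fun l => l ++ F k)) d).getD u [] = d.getD u [] := by
  induction ks generalizing d with
  | nil => rfl
  | cons k rest ih =>
      simp only [List.foldl_cons]
      rw [ih _ (fun h => hu (List.mem_cons_of_mem _ h))]
      exact PySem.Dict.getD_modify_of_ne d [] _ (fun h => hu (h ▸ List.mem_cons_self))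

theorem fold_modify_getD (F : String → List (String × String × String × String)) (ks : List String) (d : PySem.Dict String (List (String × String × String × String))) (hnd : ks.Nodup) (u : String) (hu : u ∈ ks) :
    (ks.foldl (fun pac k => pac.modify k [] (fun l => l ++ F k)) d).getD u [] = d.getD u [] ++ F u := by
  induction ks generalizing d with
  | nil => simp at hu
  | cons k rest ih =>
      simp only [List.foldl_cons]
      rcases List.mem_cons.mp hu with rfl | hu'
      · rw [fold_modify_getD_notmem F rest _ u (List.nodup_cons.mp hnd).1]
        exact PySem.Dict.getD_modify_self d u [] _
      · have hne : u ≠ k := fun he => (List.nodup_cons.mp hnd).1 (he ▸ hu')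
        rw [ih _ (List.nodup_cons.mp hnd).2 hu', PySem.Dict.getD_modify_of_ne d [] _ hne]

theorem fold_modify_keys (F : String → List (String × String × String × String)) (ks : List String) (d : PySem.Dict String (List (String × String × String × String))) (hall : ∀ k ∈ ks, d.contains k = true) :
    (ks.foldl (fun pac k => pac.modify k [] (fun l => l ++ F k)) d).keys = d.keys := by
  induction ks generalizing d with
  | nil => rfl
  | cons k rest ih =>
      simp only [List.foldl_cons]
      have hk := keys_modify_of_contains d k (fun l => l ++ F k) (hall k List.mem_cons_self)
      rw [ih _ (fun x hx => by rw [PySem.Dict.contains_iff_mem_keys, hk, ← PySem.Dict.contains_iff_mem_keys]; exact hall x (List.mem_cons_of_mem _ hx)), hk]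

-- A's outer loop, rewritten with inner_fold
theorem outer_fold (pd : PySem.Dict String (List (String × Option String))) (rd : PySem.Dict String (List (String × String × String × String))) (urls : List String) (ks : List String) (pac : PySem.Dict String (List (String × String × String × String))) (hnd : pac.keys.Nodup) (hall : ∀ u ∈ ks, pac.contains u = true) :
    ks.foldl (fun pac user => urls.foldl (pvStepA pd rd user) pac) pac =
    ks.foldl (fun pac k => pac.modify k [] (fun l => l ++ urls.flatMap (pvSegA pd rd k))) pac := by
  induction ks generalizing pac with
  | nil => rfl
  | cons user rest ih =>
      simp only [List.foldl_cons]
      rw [inner_fold pd rd user urls pac (hall user List.mem_cons_self) hnd]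
      have hk := keys_modify_of_contains pac user (fun l => l ++ urls.flatMap (pvSegA pd rd user)) (hall user List.mem_cons_self)
      exact ih _ (hk ▸ hnd) (fun x hx => by rw [PySem.Dict.contains_iff_mem_keys, hk, ← PySem.Dict.contains_iff_mem_keys]; exact hall x (List.mem_cons_of_mem _ hx))

-- the initial dict: keys are the deduplicated user names, every value is []
theorem pac0_keys (users : List (String × String)) :
    (users.foldl (fun d user => d.insert user.1 ([] : List (String × String × String × String))) PySem.Dict.empty).keys = PySem.List.dedup (users.map Prod.fst) := by
  rw [PySem.Dict.keys_foldl_insert_key users Prod.fst (fun _ _ => []) PySem.Dict.empty]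
  simp only [pysem, PySem.Dict.keys_empty]
  rw [PySem.Set.ofList_eq_foldl, List.foldl_map]

theorem pac0_getD (users : List (String × String)) (u : String) :
    (users.foldl (fun d user => d.insert user.1 ([] : List (String × String × String × String))) PySem.Dict.empty).getD u [] = [] := by
  have aux : ∀ (us : List (String × String)) (d : PySem.Dict String (List (String × String × String × String))), (∀ v, d.getD v [] = []) → ∀ v, (us.foldl (fun d user => d.insert user.1 []) d).getD v [] = [] := by
    intro us
    induction us with
    | nil => intro d h v; exact h v
    | cons p rest ih =>
        intro d h v
        simp only [List.foldl_cons]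
        refine ih _ (fun w => ?_) v
        rw [PySem.Dict.getD_insert]
        split
        · rfl
        · exact h w
  exact aux users PySem.Dict.empty (fun v => PySem.Dict.getD_empty v []) u

-- ===== VERDICT (by name: the statement is the Claim_ definition above) =====
theorem make_pac_spec : Claim_equal_make_pac := by
  intro urls users prev_items row_data _ hpre
  unfold Spec_make_pac
  simp only [make_pac, make_pac_alt]
  have hfun : pvChunk (PySem.Dict.mk prev_items) (pvTables row_data) = pvSegA (PySem.Dict.mk prev_items) (PySem.Dict.mk row_data) :=
    funext fun a => funext fun b => chunk_eq prev_items row_data hpre.1 a b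
  rw [hfun]
  have hnd : ((users.foldl (fun d user => d.insert user.1 ([] : List (String × String × String × String))) PySem.Dict.empty)).keys.Nodup :=
    PySem.Dict.nodup_keys_foldl_insert_key users Prod.fst _ _ PySem.Dict.nodup_keys_empty
  rw [outer_fold (PySem.Dict.mk prev_items) (PySem.Dict.mk row_data) urls _ _ hnd (fun u hu => (PySem.Dict.contains_iff_mem_keys _ _).mpr hu)]
  have hkeys := fold_modify_keys (fun k => urls.flatMap (pvSegA (PySem.Dict.mk prev_items) (PySem.Dict.mk row_data) k))
    ((users.foldl (fun d user => d.insert user.1 ([] : List (String × String × String × String))) PySem.Dict.empty)).keys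
    ((users.foldl (fun d user => d.insert user.1 ([] : List (String × String × String × String))) PySem.Dict.empty))
    (fun u hu => (PySem.Dict.contains_iff_mem_keys _ _).mpr hu)
  rw [PySem.Dict.items_eq_map_keys _ (by rw [hkeys]; exact hnd) ([]), hkeys]
  rw [List.map_congr_left (fun u hu => by
    rw [fold_modify_getD _ _ _ hnd u hu, pac0_getD users u, List.nil_append])]
  rw [pac0_keys users]
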